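-- pv_equiv track=rewrite | github.com/BrianEdwards85/moods | graphql/generate.py | format_cljs_def
-- ===== SOURCE A (Python) =====
-- def is_mutation(content: str) -> bool:
--     return content.lstrip().startswith("mutation")
--
-- def format_cljs_def(name: str, content: str) -> str:
--     suffix = "mutation" if is_mutation(content) else "query"
--     def_name = f"{name}-{suffix}"
--     lines = content.split("\n")
--     if len(lines) == 1:
--         return f'(def {def_name}\n  "{content}")'
--     first, *rest = lines
--     indented = "\n".join("   " + line for line in rest)
--     return f'(def {def_name}\n  "{first}\n{indented}")'
-- ===== SOURCE B (Python) =====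
-- def is_mutation(content: str) -> bool:
--     return content.lstrip().startswith("mutation")
--
-- def format_cljs_def(name: str, content: str) -> str:
--     suffix = "mutation" if is_mutation(content) else "query"
--     body = content.replace("\n", "\n   ")
--     return f'(def {name}-{suffix}\n  "{body}")'
-- ===== Notes on version B (the rewrite author's own statement) =====
-- stated objective: simpler
-- what changed: Replaces the split/len-branch/comprehension/join pipeline with one str.replace substitution that indents continuation lines, handling single- and multi-line content uniformly.
import Mathlib
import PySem

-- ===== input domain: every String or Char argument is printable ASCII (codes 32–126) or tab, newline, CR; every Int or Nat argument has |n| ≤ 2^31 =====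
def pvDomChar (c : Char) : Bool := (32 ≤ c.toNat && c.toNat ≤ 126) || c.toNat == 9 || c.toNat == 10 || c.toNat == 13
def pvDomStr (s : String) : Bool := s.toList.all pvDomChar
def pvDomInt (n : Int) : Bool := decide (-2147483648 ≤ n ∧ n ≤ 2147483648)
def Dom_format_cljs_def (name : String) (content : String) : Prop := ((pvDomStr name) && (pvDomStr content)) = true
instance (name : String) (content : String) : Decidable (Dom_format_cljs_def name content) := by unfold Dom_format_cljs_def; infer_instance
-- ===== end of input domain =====

-- B replaces A's split/branch/comprehension/join pipeline with one `replace` substitution (objective: simpler); same return value.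

-- ===== PORT A =====
-- shared helper of both Python sources (identical in Source A and Source B)
def is_mutation (content : String) : Bool :=
  PySem.Str.startswith (PySem.Str.lstrip content) "mutation"

def format_cljs_def (name : String) (content : String) : String :=
  let suffix := if is_mutation content then "mutation" else "query"
  let def_name := name ++ "-" ++ suffix
  let lines := (PySem.Str.split? content "\n").getD []   -- sep "\n" ≠ "", so split? is some
  if lines.length = 1 then
    "(def " ++ def_name ++ "\n  \"" ++ content ++ "\")"
  else
    match lines with
    | [] => ""    -- unreachable: str.split never returns an empty list
    | first :: rest =>
      let indented := PySem.Str.join "\n" (rest.map (fun line => "   " ++ line))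
      "(def " ++ def_name ++ "\n  \"" ++ first ++ "\n" ++ indented ++ "\")"

-- ===== PORT B =====
def format_cljs_def_alt (name : String) (content : String) : String :=
  let suffix := if is_mutation content then "mutation" else "query"
  let body := PySem.Str.replace content "\n" "\n   "
  "(def " ++ name ++ "-" ++ suffix ++ "\n  \"" ++ body ++ "\")"

-- ===== PRECONDITION & SPEC =====
def Spec_format_cljs_def (name : String) (content : String) (out : String) : Prop := out = format_cljs_def_alt name content
instance (name : String) (content : String) (out : String) : Decidable (Spec_format_cljs_def name content out) := by unfold Spec_format_cljs_def; infer_instance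

-- ===== CLAIM (what is proved, stated in full; the proofs are below) =====
def Claim_equal_format_cljs_def : Prop := ∀ (name : String) (content : String), Dom_format_cljs_def name content → Spec_format_cljs_def name content (format_cljs_def name content)

-- ===== LEMMAS AND PROOFS =====

-- splitOn.go moves its accumulator out front
theorem splitOn_go_acc (sep : List Char) (fuel : Nat) :
    ∀ (l cur : List Char) (acc : List (List Char)),
      PySem.Chars.splitOn.go sep fuel l cur acc
        = acc.reverse ++ PySem.Chars.splitOn.go sep fuel l cur [] := by
  induction fuel with
  | zero => intro l cur acc; simp [PySem.Chars.splitOn.go]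
  | succ f ih =>
    intro l cur acc
    cases l with
    | nil => simp [PySem.Chars.splitOn.go]
    | cons c rest =>
      simp only [PySem.Chars.splitOn.go]
      split_ifs with h
      · rw [ih _ _ (cur.reverse :: acc), ih _ _ [cur.reverse]]; simp
      · rw [ih rest (c :: cur) acc]

-- splitOn.go never returns the empty list
theorem splitOn_go_ne_nil (sep : List Char) (fuel : Nat) :
    ∀ (l cur : List Char), PySem.Chars.splitOn.go sep fuel l cur [] ≠ [] := by
  induction fuel with
  | zero => intro l cur; simp [PySem.Chars.splitOn.go]
  | succ f ih =>
    intro l cur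
    cases l with
    | nil => simp [PySem.Chars.splitOn.go]
    | cons c rest =>
      simp only [PySem.Chars.splitOn.go]
      split_ifs with h
      · rw [splitOn_go_acc]; simp
      · exact ih rest (c :: cur)

-- replace.go moves its accumulator out front
theorem replace_go_acc (old new : List Char) (fuel : Nat) :
    ∀ (l acc : List Char),
      PySem.Chars.replace.go old new fuel l acc
        = acc.reverse ++ PySem.Chars.replace.go old new fuel l [] := by
  induction fuel with
  | zero => intro l acc; simp [PySem.Chars.replace.go]
  | succ f ih =>
    intro l acc
    cases l with
    | nil => simp [PySem.Chars.replace.go]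
    | cons c rest =>
      simp only [PySem.Chars.replace.go]
      split_ifs with h
      · rw [ih _ (new.reverse ++ acc), ih _ (new.reverse ++ [])]; simp
      · rw [ih rest (c :: acc), ih rest [c]]; simp

-- the key bridge: joining the pieces of splitOn with `new` IS replace
theorem join_splitOn_go (sep new : List Char) (hsep : sep ≠ []) (fuel : Nat) :
    ∀ (l cur : List Char), l.length < fuel →
      PySem.Chars.join new (PySem.Chars.splitOn.go sep fuel l cur [])
        = cur.reverse ++ PySem.Chars.replace.go sep new fuel l [] := by
  induction fuel with
  | zero => intro l cur h; omega
  | succ f ih =>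
    intro l cur h
    cases l with
    | nil =>
      simp [PySem.Chars.splitOn.go, PySem.Chars.replace.go, PySem.Chars.join,
        List.intercalate]
    | cons c rest =>
      simp only [PySem.Chars.splitOn.go, PySem.Chars.replace.go]
      split_ifs with hp
      · have hdrop : (List.drop sep.length (c :: rest)).length < f := by
          have : 1 ≤ sep.length := by
            cases sep with | nil => exact absurd rfl hsep | cons _ _ => simp
          simp only [List.length_drop, List.length_cons] at *
          omega
        rw [splitOn_go_acc]
        obtain ⟨p, ps, hps⟩ : ∃ p ps,
            PySem.Chars.splitOn.go sep f (List.drop sep.length (c :: rest)) [] [] = p :: ps := by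
          cases hgo : PySem.Chars.splitOn.go sep f (List.drop sep.length (c :: rest)) [] [] with
          | nil => exact absurd hgo (splitOn_go_ne_nil sep f _ _)
          | cons p ps => exact ⟨p, ps, rfl⟩
        rw [hps]
        have hrec := ih (List.drop sep.length (c :: rest)) [] hdrop
        rw [hps] at hrec
        simp only [List.reverse_nil, List.nil_append] at hrec
        simp only [List.reverse_cons, List.reverse_nil, List.nil_append, List.singleton_append]
        rw [PySem.Chars.join_cons_cons, hrec,
          replace_go_acc sep new f _ (new.reverse ++ [])]
        simp [List.append_assoc]
      · have hrest : rest.length < f := by simp at h; omega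
        rw [ih rest (c :: cur) hrest, replace_go_acc sep new f rest [c]]
        simp

-- lifted to splitOn / replace themselves
theorem join_splitOn (sep new cs : List Char) (hsep : sep ≠ []) :
    PySem.Chars.join new (PySem.Chars.splitOn cs sep)
      = PySem.Chars.replace cs sep new := by
  have h1 : PySem.Chars.splitOn cs sep = PySem.Chars.splitOn.go sep (cs.length + 1) cs [] [] := rfl
  have h2 : PySem.Chars.replace cs sep new = PySem.Chars.replace.go sep new cs.length cs [] := by
    unfold PySem.Chars.replace
    simp [List.isEmpty_iff, hsep]
  rw [h1, h2]
  have key := join_splitOn_go sep new hsep (cs.length + 1) cs [] (by omega)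
  simp only [List.reverse_nil, List.nil_append] at key
  rw [key]
  -- one extra unit of fuel does not change replace.go when fuel ≥ length
  have fuel_eq : ∀ fuel (l : List Char), l.length ≤ fuel →
      PySem.Chars.replace.go sep new (fuel + 1) l [] = PySem.Chars.replace.go sep new fuel l [] := by
    intro fuel
    induction fuel with
    | zero =>
      intro l hl
      have : l = [] := List.length_eq_zero_iff.mp (Nat.le_zero.mp hl)
      subst this
      simp [PySem.Chars.replace.go]
    | succ f ihf =>
      intro l hl
      cases l with
      | nil => simp [PySem.Chars.replace.go]
      | cons c rest =>
        simp only [PySem.Chars.replace.go]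
        split_ifs with hp
        · have hsl : 1 ≤ sep.length := by
            cases sep with | nil => exact absurd rfl hsep | cons _ _ => simp
          rw [replace_go_acc sep new (f + 1), replace_go_acc sep new f]
          rw [ihf _ (by simp at hl ⊢; omega)]
        · rw [replace_go_acc sep new (f + 1) rest [c], replace_go_acc sep new f rest [c]]
          rw [ihf rest (by simp at hl; omega)]
  exact fuel_eq cs.length cs (le_refl _)

-- replacing a separator by itself is the identity
theorem replace_self_go (old : List Char) (fuel : Nat) :
    ∀ (l : List Char), PySem.Chars.replace.go old old fuel l [] = l := by
  induction fuel with
  | zero => intro l; simp [PySem.Chars.replace.go]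
  | succ f ih =>
    intro l
    cases l with
    | nil => simp [PySem.Chars.replace.go]
    | cons c rest =>
      simp only [PySem.Chars.replace.go]
      split_ifs with hp
      · rw [replace_go_acc old old f _ (old.reverse ++ []), ih]
        have := List.prefix_iff_eq_append.mp (List.isPrefixOf_iff_prefix.mp hp)
        simpa using this
      · rw [replace_go_acc old old f rest [c], ih]
        simp

theorem replace_self (old cs : List Char) (hold : old ≠ []) :
    PySem.Chars.replace cs old old = cs := by
  unfold PySem.Chars.replace
  simp only [List.isEmpty_iff, hold]
  exact replace_self_go old cs.length cs

-- prefixing every piece with `ind` and joining with sep equals joining with (sep ++ ind), after a leading sep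
theorem sep_join_map_indent (sep ind : List Char) :
    ∀ (r : List Char) (rs : List (List Char)),
      sep ++ PySem.Chars.join sep ((r :: rs).map (fun l => ind ++ l))
        = (sep ++ ind) ++ PySem.Chars.join (sep ++ ind) (r :: rs) := by
  intro r rs
  induction rs generalizing r with
  | nil => simp [PySem.Chars.join_singleton]
  | cons q qs ih =>
    have h := ih q
    simp only [List.map_cons, List.append_assoc] at h ⊢
    rw [PySem.Chars.join_cons_cons, PySem.Chars.join_cons_cons]
    simp only [List.append_assoc]
    rw [h]

theorem string_eq_of_toList (s t : String) (h : s.toList = t.toList) : s = t := by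
  have := congrArg String.ofList h
  simpa [String.ofList_toList] using this

-- ===== VERDICT (by name: the statement is the Claim_ definition above) =====
theorem format_cljs_def_spec : Claim_equal_format_cljs_def := by
  intro name content _
  unfold Spec_format_cljs_def format_cljs_def format_cljs_def_alt
  set suffix := if is_mutation content then "mutation" else "query" with hsuf
  have hsplit : PySem.Str.split? content "\n"
      = some ((PySem.Chars.splitOn content.toList ['\n']).map String.ofList) := by
    simp [PySem.Str.split?, PySem.Chars.split?]
  apply string_eq_of_toList
  rw [hsplit]
  simp only [Option.getD_some]
  have hjoin := join_splitOn ['\n'] ('\n' :: "   ".toList) content.toList (by simp)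
  cases hsp : PySem.Chars.splitOn content.toList ['\n'] with
  | nil => exact absurd hsp (splitOn_go_ne_nil ['\n'] _ _ _)
  | cons p ps =>
    rw [hsp] at hjoin
    cases ps with
    | nil =>
      -- single line: splitOn returned [p] with p = content
      have hpc : p = content.toList := by
        have hid := join_splitOn ['\n'] ['\n'] content.toList (by simp)
        rw [hsp, PySem.Chars.join_singleton, replace_self ['\n'] content.toList (by simp)] at hid
        exact hid
      have hbody : PySem.Chars.replace content.toList ['\n'] ['\n', ' ', ' ', ' ']
          = content.toList := by
        rw [show (['\n', ' ', ' ', ' '] : List Char) = '\n' :: "   ".toList from rfl,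
          ← hjoin, PySem.Chars.join_singleton, hpc]
      simp [String.toList_append, PySem.Str.toList_replace]
      exact hbody.symm
    | cons q qs =>
      simp only [List.map_cons, List.length_cons]
      rw [if_neg (by omega)]
      simp only [String.toList_append, PySem.Str.toList_replace, PySem.Str.toList_join]
      have hrep : PySem.Chars.replace content.toList "\n".toList "\n   ".toList
          = p ++ ('\n' :: "   ".toList) ++ PySem.Chars.join ('\n' :: "   ".toList) (q :: qs) := by
        rw [show ("\n".toList : List Char) = ['\n'] from rfl,
          show ("\n   ".toList : List Char) = '\n' :: "   ".toList from rfl,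
          ← hjoin, PySem.Chars.join_cons_cons]
      have hmap : List.map String.toList
          (("   " ++ String.ofList q) :: List.map (fun line => "   " ++ line) (List.map String.ofList qs))
          = ("   ".toList ++ q) :: qs.map (fun l => "   ".toList ++ l) := by
        simp [Function.comp, String.toList_append]
      rw [hmap, hrep]
      have key := sep_join_map_indent ['\n'] "   ".toList q qs
      simp only [List.map_cons] at key
      simp only [String.toList_ofList, List.append_assoc,
        List.cons_append, List.nil_append] at key ⊢
      rw [show ("\n".toList : List Char) = ['\n'] from rfl]
      simp only [List.singleton_append]
      injection key with _ key2
      simp only [key2, List.append_assoc]
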